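-- pv_equiv track=rewrite | github.com/kevinnbass/TestMaster | autonomous_sandbox/run_intelligence_system.py | _add_output_files
-- ===== SOURCE A (Python) =====
-- from typing import Dict, List, Optional, Any
--
-- def _add_output_files(report: List, report_count: int, MAX_REPORT_LINES: int,
--                      results: Dict[str, Any]) -> int:
--     """Add output files section (helper function)"""
--     current_count = report_count
--
--     if current_count < MAX_REPORT_LINES:
--         report[current_count] = "## Output Files Generated"
--         current_count += 1
--
--     output_files = results.get('output_files', {})
--     output_items = list(output_files.items())
--     for i in range(min(len(output_items), 20)):
--         file_type, file_path = output_items[i]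
--         if current_count < MAX_REPORT_LINES:
--             report[current_count] = f"- {file_type.replace('_', ' ').title()}: `{file_path}`"
--             current_count += 1
--
--     return current_count
-- ===== SOURCE B (Python) =====
-- def _add_output_files(report, report_count, MAX_REPORT_LINES, results):
--     """Return the final line count in closed form (no counting loop); the writes
--     A performs are done as one slice assignment.  Same return value as A; the
--     in-place effect on `report` is identical for 0 <= report_count."""
--     if report_count >= MAX_REPORT_LINES:
--         return report_count
--     n = len(results.get('output_files', {}))
--     end = min(report_count + 1 + min(n, 20), MAX_REPORT_LINES)
--     lines = ["## Output Files Generated"] + [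
--         f"- {ft.replace('_', ' ').title()}: `{fp}`"
--         for ft, fp in list(results.get('output_files', {}).items())[:20]
--     ]
--     report[report_count:end] = lines[:end - report_count]
--     return end
-- ===== Notes on version B (the rewrite author's own statement) =====
-- stated objective: simpler
-- what changed: B computes the returned line count purely arithmetically in closed form (report_count if report_count >= MAX, else min(report_count + 1 + min(len(output_files), 20), MAX)) with no counting loop at all, and performs A's writes as a single slice assignment instead of A's per-item guarded write-and-increment loop.
import Mathlib
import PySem

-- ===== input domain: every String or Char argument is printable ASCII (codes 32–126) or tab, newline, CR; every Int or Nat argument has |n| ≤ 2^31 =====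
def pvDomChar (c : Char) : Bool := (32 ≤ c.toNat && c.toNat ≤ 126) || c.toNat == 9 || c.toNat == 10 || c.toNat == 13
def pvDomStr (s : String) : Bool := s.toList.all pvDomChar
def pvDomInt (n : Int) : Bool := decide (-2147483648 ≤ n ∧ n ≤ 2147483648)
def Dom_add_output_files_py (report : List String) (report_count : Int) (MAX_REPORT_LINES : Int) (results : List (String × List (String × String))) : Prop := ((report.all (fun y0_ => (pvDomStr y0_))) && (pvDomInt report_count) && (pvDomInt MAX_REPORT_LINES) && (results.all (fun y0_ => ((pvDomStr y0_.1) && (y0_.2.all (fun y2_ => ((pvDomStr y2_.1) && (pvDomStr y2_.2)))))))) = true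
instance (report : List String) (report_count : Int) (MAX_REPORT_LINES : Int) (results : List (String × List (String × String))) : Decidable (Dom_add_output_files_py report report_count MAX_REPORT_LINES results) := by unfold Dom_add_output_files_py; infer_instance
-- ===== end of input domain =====

-- B replaces A's guarded write-and-increment loop by a closed-form count (no counting loop)
-- plus one slice assignment for the writes (objective: simpler). Equivalence is about the
-- RETURN value; B's in-place effect on `report` equals A's for 0 ≤ report_count.

-- ASCII str.title() helpers (hand port, exact on the ASCII domain: cased chars are a-z/A-Z)
def pvUpperC (c : Char) : Char := if 'a' ≤ c ∧ c ≤ 'z' then Char.ofNat (c.toNat - 32) else c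
def pvLowerC (c : Char) : Char := if 'A' ≤ c ∧ c ≤ 'Z' then Char.ofNat (c.toNat + 32) else c
def pvIsCased (c : Char) : Bool := ('a' ≤ c && c ≤ 'z') || ('A' ≤ c && c ≤ 'Z')
def pvTitleGo : Bool → List Char → List Char
  | _, [] => []
  | prev, c :: rest =>
    if pvIsCased c then (if prev then pvLowerC c else pvUpperC c) :: pvTitleGo true rest
    else c :: pvTitleGo false rest
-- f"- {file_type.replace('_', ' ').title()}: `{file_path}`"  (shared formatting helper)
def pvFmtLine (file_type file_path : String) : String :=
  "- " ++ String.ofList (pvTitleGo false (PySem.Str.replace file_type "_" " ").toList) ++ ": `" ++ file_path ++ "`"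

-- ===== PORT A =====
def add_output_files_py (report : List String) (report_count : Int) (MAX_REPORT_LINES : Int) (results : List (String × List (String × String))) : Int :=
  let current_count := report_count
  let st : List String × Int :=
    if current_count < MAX_REPORT_LINES then
      (PySem.List.pySetD report current_count "## Output Files Generated", current_count + 1)
    else (report, current_count)
  -- results.get('output_files', {}) : first-match lookup in the association list
  let output_files := (List.lookup "output_files" results).getD []
  let output_items := output_files
  let st2 := (PySem.List.pyRange 0 (min (output_items.length : Int) 20) 1).foldl
    (fun (st : List String × Int) i =>
      let p := (PySem.List.pyGet? output_items i).getD ("", "")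
      if st.2 < MAX_REPORT_LINES then
        (PySem.List.pySetD st.1 st.2 (pvFmtLine p.1 p.2), st.2 + 1)
      else st) st
  st2.2

-- ===== PORT B =====
def add_output_files_py_alt (report : List String) (report_count : Int) (MAX_REPORT_LINES : Int) (results : List (String × List (String × String))) : Int :=
  if MAX_REPORT_LINES ≤ report_count then report_count
  else
    let n : Int := ((List.lookup "output_files" results).getD []).length
    let endIdx := min (report_count + 1 + min n 20) MAX_REPORT_LINES
    -- report[report_count:endIdx] = lines[:endIdx - report_count]  (in-place slice assignment;
    -- affects only `report`, not the returned count)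
    let lines := "## Output Files Generated" ::
      (PySem.List.slice ((List.lookup "output_files" results).getD []) none (some 20)).map
        (fun p => pvFmtLine p.1 p.2)
    let _report := PySem.List.slice report none (some report_count)
      ++ PySem.List.slice lines none (some (endIdx - report_count))
      ++ PySem.List.slice report (some endIdx) none
    endIdx

-- ===== PRECONDITION & SPEC =====
-- Pre_ excludes exactly the inputs on which A raises IndexError: some write index
-- (report_count .. report_count + w - 1, w as computed below) is not a valid Python
-- index into report.
def Pre_add_output_files_py (report : List String) (report_count : Int) (MAX_REPORT_LINES : Int) (results : List (String × List (String × String))) : Prop :=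
  let k : Int := ((List.lookup "output_files" results).getD []).length
  let w : Int := if report_count < MAX_REPORT_LINES then min (1 + min k 20) (MAX_REPORT_LINES - report_count) else 0
  w = 0 ∨ (-(report.length : Int) ≤ report_count ∧ report_count + w ≤ (report.length : Int))
instance (report : List String) (report_count : Int) (MAX_REPORT_LINES : Int) (results : List (String × List (String × String))) : Decidable (Pre_add_output_files_py report report_count MAX_REPORT_LINES results) := by unfold Pre_add_output_files_py; infer_instance
def pvWitness_add_output_files_py : List String × Int × Int × (List (String × List (String × String))) :=
  (["", "", ""], 0, 3, [("output_files", [("log_file", "out.txt")])])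

def Spec_add_output_files_py (report : List String) (report_count : Int) (MAX_REPORT_LINES : Int) (results : List (String × List (String × String))) (out : Int) : Prop := out = add_output_files_py_alt report report_count MAX_REPORT_LINES results
instance (report : List String) (report_count : Int) (MAX_REPORT_LINES : Int) (results : List (String × List (String × String))) (out : Int) : Decidable (Spec_add_output_files_py report report_count MAX_REPORT_LINES results out) := by unfold Spec_add_output_files_py; infer_instance

-- ===== CLAIM (what is proved, stated in full; the proofs are below) =====
def Claim_equal_add_output_files_py : Prop := ∀ (report : List String) (report_count : Int) (MAX_REPORT_LINES : Int) (results : List (String × List (String × String))), Dom_add_output_files_py report report_count MAX_REPORT_LINES results → Pre_add_output_files_py report report_count MAX_REPORT_LINES results → Spec_add_output_files_py report report_count MAX_REPORT_LINES results (add_output_files_py report report_count MAX_REPORT_LINES results)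
-- ===== LEMMAS AND PROOFS =====

-- A's loop only reads the counter to decide whether to increment, so its final counter is
-- max c (min (c + length) MAX), independently of the list contents and of the report state.
lemma pvA_loop_count (items : List (String × String)) (MAX : Int) (l : List Int)
    (r : List String) (c : Int) :
    (l.foldl (fun (st : List String × Int) i =>
      if st.2 < MAX then
        (PySem.List.pySetD st.1 st.2
          (pvFmtLine ((PySem.List.pyGet? items i).getD ("", "")).1
            ((PySem.List.pyGet? items i).getD ("", "")).2), st.2 + 1)
      else st) (r, c)).2 = max c (min (c + l.length) MAX) := by
  induction l generalizing r c with
  | nil =>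
    simp only [List.foldl_nil, List.length_nil, Nat.cast_zero, add_zero]
    omega
  | cons i l ih =>
    simp only [List.foldl_cons, List.length_cons]
    by_cases h : c < MAX
    · simp only [h, if_pos] ; rw [ih] ; push_cast ; omega
    · simp only [h, if_neg, not_false_iff] ; rw [ih] ; push_cast ; omega

-- ===== VERDICT (by name: the statement is the Claim_ definition above) =====
theorem add_output_files_py_spec : Claim_equal_add_output_files_py := by
  intro report report_count MAX_REPORT_LINES results _hdom _hpre
  unfold Spec_add_output_files_py add_output_files_py add_output_files_py_alt
  dsimp only
  by_cases h : report_count < MAX_REPORT_LINES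
  · rw [if_pos h, pvA_loop_count, PySem.List.length_pyRange_one, if_neg (not_le.mpr h)]
    omega
  · rw [if_neg h, pvA_loop_count, PySem.List.length_pyRange_one, if_pos (not_lt.mp h)]
    omega
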